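-- pv_equiv track=rewrite | github.com/finderweb/finderweb | user.py | trim_name
-- ===== SOURCE A (Python) =====
-- def trim_name(name):
--     fname = ""
--     for ch in name:
--         if 'a' <= ch <= 'z':
--             fname += ch
--         elif 'A' <= ch <= 'Z':
--             fname += ch
--         else:
--             fname += ' '
--     return fname
-- ===== SOURCE B (Python) =====
-- import re
--
-- def trim_name(name):
--     return re.sub(r'[^A-Za-z]', ' ', name)
-- ===== Notes on version B (the rewrite author's own statement) =====
-- stated objective: idiomatic
-- what changed: Replaced the character-by-character loop with string concatenation by a single regex substitution replacing every non-ASCII-letter character with a space.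
import Mathlib
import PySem

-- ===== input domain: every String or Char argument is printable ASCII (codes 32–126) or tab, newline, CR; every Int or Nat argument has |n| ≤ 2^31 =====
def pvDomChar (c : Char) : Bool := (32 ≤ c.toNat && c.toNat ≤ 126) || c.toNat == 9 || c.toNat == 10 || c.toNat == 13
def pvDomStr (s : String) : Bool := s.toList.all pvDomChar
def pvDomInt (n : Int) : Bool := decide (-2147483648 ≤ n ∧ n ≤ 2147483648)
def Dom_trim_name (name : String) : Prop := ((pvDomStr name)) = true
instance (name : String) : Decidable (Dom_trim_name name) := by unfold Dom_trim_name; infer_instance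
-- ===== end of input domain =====

-- B replaces A's character loop with accumulator by a single regex substitution
-- (re.sub(r'[^A-Za-z]', ' ', name)); objective: idiomatic.

-- ===== PORT A =====
-- A: loop over the characters, appending the letter or a space to an accumulator string.
def trim_name (name : String) : String :=
  name.toList.foldl
    (fun fname ch =>
      if 'a' ≤ ch ∧ ch ≤ 'z' then fname ++ [ch]
      else if 'A' ≤ ch ∧ ch ≤ 'Z' then fname ++ [ch]
      else fname ++ [' ']) []
  |> String.mk

-- ===== PORT B =====
-- B: re.sub('[^A-Za-z]', ' ', name); the regex engine replaces each character not in
-- the class [A-Za-z] by ' ', i.e. a per-character substitution map over the string.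
def trim_name_alt (name : String) : String :=
  String.mk (name.toList.map (fun c =>
    if ('A' ≤ c ∧ c ≤ 'Z') ∨ ('a' ≤ c ∧ c ≤ 'z') then c else ' '))

-- ===== PRECONDITION & SPEC =====
def Spec_trim_name (name : String) (out : String) : Prop := out = trim_name_alt name
instance (name : String) (out : String) : Decidable (Spec_trim_name name out) := by unfold Spec_trim_name; infer_instance

-- ===== CLAIM (what is proved, stated in full; the proofs are below) =====
def Claim_equal_trim_name : Prop := ∀ (name : String), Dom_trim_name name → Spec_trim_name name (trim_name name)

-- ===== LEMMAS AND PROOFS =====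
theorem trim_name_fold_eq (l : List Char) (acc : List Char) :
    l.foldl
      (fun fname ch =>
        if 'a' ≤ ch ∧ ch ≤ 'z' then fname ++ [ch]
        else if 'A' ≤ ch ∧ ch ≤ 'Z' then fname ++ [ch]
        else fname ++ [' ']) acc
    = acc ++ l.map (fun c =>
        if ('A' ≤ c ∧ c ≤ 'Z') ∨ ('a' ≤ c ∧ c ≤ 'z') then c else ' ') := by
  induction l generalizing acc with
  | nil => simp
  | cons c t ih =>
    simp only [List.foldl, List.map]
    rw [ih]
    by_cases h1 : 'a' ≤ c ∧ c ≤ 'z' <;> by_cases h2 : 'A' ≤ c ∧ c ≤ 'Z' <;>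
      simp [h1, h2]

-- ===== VERDICT (by name: the statement is the Claim_ definition above) =====
theorem trim_name_spec : Claim_equal_trim_name := by
  intro name _
  unfold Spec_trim_name trim_name trim_name_alt
  rw [trim_name_fold_eq]
  simp
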